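-- pv_equiv track=rewrite | github.com/nrsherr2/advent-of-code-2023-python | src/21.py | calcLocs
-- ===== SOURCE A (Python) =====
-- def calcLocs(numSteps, numLines, numCols, currentLocs, rocLocs):
--     for i in range(numSteps):
--         newLocs = set()
--         for loc in currentLocs:
--             for d in [(1, 0), (-1, 0), (0, 1), (0, -1)]:
--                 nl = (loc[0] + d[0], loc[1] + d[1])
--                 if nl not in rocLocs and 0 <= nl[0] < numLines and 0 <= nl[1] < numCols:
--                     newLocs.add(nl)
--         currentLocs = newLocs
--     return currentLocs
-- ===== SOURCE B (Python) =====
-- def calcLocs(numSteps, numLines, numCols, currentLocs, rocLocs):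
--     rocks = set(rocLocs)
--
--     def step(locs):
--         new = set()
--         for loc in locs:
--             for nl in ((loc[0] + 1, loc[1]), (loc[0] - 1, loc[1]),
--                        (loc[0], loc[1] + 1), (loc[0], loc[1] - 1)):
--                 if nl not in rocks and 0 <= nl[0] < numLines and 0 <= nl[1] < numCols:
--                     new.add(nl)
--         return new
--
--     i = 0
--     prev = cur = currentLocs
--     while i < numSteps:
--         new = step(cur)
--         if i >= 2 and new == prev:  # frontier oscillates with period 2 from step i-1 on: jump by parity
--             # frontier oscillates with period 2 from step i-1 on: jump by parity
--             return new if (numSteps - i - 1) % 2 == 0 else cur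
--         prev, cur = cur, new
--         i += 1
--     return cur
-- ===== Notes on version B (the rewrite author's own statement) =====
-- stated objective: alternative
-- what changed: B hashes the rocks into a set once and detects the period-2 oscillation of the frontier (new frontier equals the one two steps back), then jumps straight to the answer by the parity of the remaining step count instead of simulating every one of the numSteps iterations; when the oscillation is never reached it simulates the same sequence of frontiers.
import Mathlib
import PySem

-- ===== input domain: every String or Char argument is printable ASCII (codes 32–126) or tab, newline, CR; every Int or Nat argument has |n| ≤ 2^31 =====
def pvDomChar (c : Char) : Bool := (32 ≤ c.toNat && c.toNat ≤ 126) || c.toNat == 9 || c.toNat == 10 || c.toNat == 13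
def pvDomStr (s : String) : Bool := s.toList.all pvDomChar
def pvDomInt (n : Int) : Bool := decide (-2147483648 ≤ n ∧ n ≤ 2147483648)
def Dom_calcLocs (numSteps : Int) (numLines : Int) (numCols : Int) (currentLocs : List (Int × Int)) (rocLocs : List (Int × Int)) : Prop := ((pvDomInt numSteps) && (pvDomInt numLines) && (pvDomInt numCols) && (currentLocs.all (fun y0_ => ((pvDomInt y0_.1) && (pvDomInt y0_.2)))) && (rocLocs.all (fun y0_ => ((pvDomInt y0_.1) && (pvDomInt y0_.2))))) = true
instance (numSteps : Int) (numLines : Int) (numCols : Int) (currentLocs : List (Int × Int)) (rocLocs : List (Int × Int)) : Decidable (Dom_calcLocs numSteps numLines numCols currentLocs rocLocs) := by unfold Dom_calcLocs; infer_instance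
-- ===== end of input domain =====

-- B hashes the rock list into a set once and stops simulating as soon as the frontier repeats with
-- period 2, jumping to the answer by the parity of the remaining step count (an exact alternative;
-- otherwise it simulates the same sequence). Equivalence is about the RETURN value; no argument is mutated.

-- ===== PORT A =====
def calcLocs (numSteps : Int) (numLines : Int) (numCols : Int) (currentLocs : List (Int × Int)) (rocLocs : List (Int × Int)) : List (Int × Int) :=
  (PySem.List.pyRange 0 numSteps 1).foldl (fun cur _ =>
    cur.foldl (fun newLocs loc =>
      ([((1 : Int), (0 : Int)), (-1, 0), (0, 1), (0, -1)]).foldl (fun nls d =>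
        let nl := (loc.1 + d.1, loc.2 + d.2)
        if nl ∉ rocLocs ∧ 0 ≤ nl.1 ∧ nl.1 < numLines ∧ 0 ≤ nl.2 ∧ nl.2 < numCols
        then PySem.Set.add nls nl else nls) newLocs) (PySem.Set.empty)) currentLocs

-- ===== PORT B =====
-- one step of the walk, rocks already a set
def calcLocsStepB (numLines : Int) (numCols : Int) (rocks : PySem.Set (Int × Int)) (locs : List (Int × Int)) : List (Int × Int) :=
  locs.foldl (fun new loc =>
    [(loc.1 + 1, loc.2), (loc.1 - 1, loc.2), (loc.1, loc.2 + 1), (loc.1, loc.2 - 1)].foldl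
      (fun new nl =>
        if nl ∉ rocks ∧ 0 ≤ nl.1 ∧ nl.1 < numLines ∧ 0 ≤ nl.2 ∧ nl.2 < numCols
        then PySem.Set.add new nl else new) new) (PySem.Set.empty)

-- the while loop; fuel = number of iterations left (numSteps.toNat at the start).
-- Python compares the sets 'new == prev'; the port compares the representation lists — a stricter
-- test: when it fails the loop simply keeps simulating the exact same sequence of frontiers.
def calcLocsLoopB (numSteps : Int) (numLines : Int) (numCols : Int) (rocks : PySem.Set (Int × Int)) :
    Nat → Int → List (Int × Int) → List (Int × Int) → List (Int × Int)
  | 0, _, _, cur => cur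
  | n + 1, i, prev, cur =>
    let new := calcLocsStepB numLines numCols rocks cur
    if 2 ≤ i ∧ new = prev then
      (if PySem.Int.mod (numSteps - i - 1) 2 = 0 then new else cur)
    else calcLocsLoopB numSteps numLines numCols rocks n (i + 1) cur new

def calcLocs_alt (numSteps : Int) (numLines : Int) (numCols : Int) (currentLocs : List (Int × Int)) (rocLocs : List (Int × Int)) : List (Int × Int) :=
  calcLocsLoopB numSteps numLines numCols (PySem.Set.ofList rocLocs) numSteps.toNat 0 currentLocs currentLocs

-- ===== PRECONDITION & SPEC =====
def Spec_calcLocs (numSteps : Int) (numLines : Int) (numCols : Int) (currentLocs : List (Int × Int)) (rocLocs : List (Int × Int)) (out : List (Int × Int)) : Prop := out = calcLocs_alt numSteps numLines numCols currentLocs rocLocs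
instance (numSteps : Int) (numLines : Int) (numCols : Int) (currentLocs : List (Int × Int)) (rocLocs : List (Int × Int)) (out : List (Int × Int)) : Decidable (Spec_calcLocs numSteps numLines numCols currentLocs rocLocs out) := by unfold Spec_calcLocs; infer_instance

-- ===== CLAIM (what is proved, stated in full; the proofs are below) =====
def Claim_equal_calcLocs : Prop := ∀ (numSteps : Int) (numLines : Int) (numCols : Int) (currentLocs : List (Int × Int)) (rocLocs : List (Int × Int)), Dom_calcLocs numSteps numLines numCols currentLocs rocLocs → Spec_calcLocs numSteps numLines numCols currentLocs rocLocs (calcLocs numSteps numLines numCols currentLocs rocLocs)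

-- ===== LEMMAS AND PROOFS =====

-- A's one step, as a function (exactly the body of A's outer loop)
def stepA (numLines : Int) (numCols : Int) (rocLocs : List (Int × Int)) (cur : List (Int × Int)) : List (Int × Int) :=
  cur.foldl (fun newLocs loc =>
    ([((1 : Int), (0 : Int)), (-1, 0), (0, 1), (0, -1)]).foldl (fun nls d =>
      let nl := (loc.1 + d.1, loc.2 + d.2)
      if nl ∉ rocLocs ∧ 0 ≤ nl.1 ∧ nl.1 < numLines ∧ 0 ≤ nl.2 ∧ nl.2 < numCols
      then PySem.Set.add nls nl else nls) newLocs) (PySem.Set.empty)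

theorem foldl_const_eq_iterate {α β : Type} (g : α → α) (l : List β) (init : α) :
    l.foldl (fun c _ => g c) init = g^[l.length] init := by
  induction l generalizing init with
  | nil => rfl
  | cons x t ih => simp [List.foldl, ih, Function.iterate_succ_apply]

theorem calcLocs_eq_iterate (numSteps numLines numCols : Int) (currentLocs rocLocs : List (Int × Int)) :
    calcLocs numSteps numLines numCols currentLocs rocLocs
      = (stepA numLines numCols rocLocs)^[numSteps.toNat] currentLocs := by
  unfold calcLocs stepA
  rw [foldl_const_eq_iterate]
  simp [PySem.List.length_pyRange_one]

theorem stepB_eq_stepA (numLines numCols : Int) (rocLocs : List (Int × Int)) (locs : List (Int × Int)) :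
    calcLocsStepB numLines numCols (PySem.Set.ofList rocLocs) locs = stepA numLines numCols rocLocs locs := by
  unfold calcLocsStepB stepA
  congr 1
  funext new loc
  simp only [List.foldl]
  simp [PySem.Set.mem_ofList, sub_eq_add_neg]

-- period-2 periodicity: once f^[a+2] x = f^[a] x, every even number of further steps is a no-op
theorem iterate_period2 {α : Type} (f : α → α) (x : α) (a : Nat)
    (h : f^[a + 2] x = f^[a] x) : ∀ k, f^[a + 2 * k] x = f^[a] x := by
  intro k
  induction k with
  | zero => rfl
  | succ k ih =>
    have e1 : a + 2 * (k + 1) = 2 + (a + 2 * k) := by ring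
    rw [e1, Function.iterate_add_apply, ih, ← Function.iterate_add_apply]
    have e2 : 2 + a = a + 2 := by ring
    rw [e2]
    exact h

theorem loopB_eq_iterate (numSteps numLines numCols : Int) (rocLocs : List (Int × Int))
    (S0 : List (Int × Int)) (N : Nat) (hN : (N : Int) = numSteps) :
    ∀ (n inat : Nat), n + inat = N →
      calcLocsLoopB numSteps numLines numCols (PySem.Set.ofList rocLocs) n (inat : Int)
        ((stepA numLines numCols rocLocs)^[inat - 1] S0)
        ((stepA numLines numCols rocLocs)^[inat] S0)
      = (stepA numLines numCols rocLocs)^[N] S0 := by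
  set f := stepA numLines numCols rocLocs with hf
  intro n
  induction n with
  | zero =>
    intro inat h
    have : inat = N := by omega
    subst this
    rfl
  | succ n ih =>
    intro inat h
    rw [calcLocsLoopB]
    simp only [stepB_eq_stepA, ← hf, ← Function.iterate_succ_apply' f inat S0]
    by_cases hc : (2 : Int) ≤ (inat : Int) ∧ f^[inat + 1] S0 = f^[inat - 1] S0
    · rw [if_pos hc]
      obtain ⟨hi2, hper⟩ := hc
      have hi2' : 2 ≤ inat := by exact_mod_cast hi2
      have hbase : f^[(inat - 1) + 2] S0 = f^[inat - 1] S0 := by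
        have e : (inat - 1) + 2 = inat + 1 := by omega
        rw [e]; exact hper
      have hbase1 : f^[inat + 2] S0 = f^[inat] S0 := by
        have step := congrArg f hbase
        rw [← Function.iterate_succ_apply' f ((inat - 1) + 2) S0,
            ← Function.iterate_succ_apply' f (inat - 1) S0] at step
        simp only [Nat.succ_eq_add_one] at step
        have e1 : (inat - 1) + 2 + 1 = inat + 2 := by omega
        have e2 : (inat - 1) + 1 = inat := by omega
        rw [e1, e2] at step
        exact step
      have hmod : PySem.Int.mod (numSteps - (inat : Int) - 1) 2 = ((n : Int) % 2) := by
        have e : numSteps - (inat : Int) - 1 = (n : Int) := by omega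
        rw [e]
        simp [PySem.Int.mod, Int.fmod_eq_emod]
      rw [hmod]
      by_cases he : (n : Int) % 2 = 0
      · rw [if_pos he]
        have hb : f^[(inat + 1) + 2] S0 = f^[inat + 1] S0 := by
          have step := congrArg f hbase1
          rw [← Function.iterate_succ_apply' f (inat + 2) S0,
              ← Function.iterate_succ_apply' f inat S0] at step
          simp only [Nat.succ_eq_add_one] at step
          exact step
        have hNe : N = (inat + 1) + 2 * (n / 2) := by omega
        rw [hNe]
        exact (iterate_period2 f S0 (inat + 1) hb (n / 2)).symm
      · rw [if_neg he]
        have hNe : N = inat + 2 * (n / 2 + 1) := by omega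
        rw [hNe]
        exact (iterate_period2 f S0 inat hbase1 (n / 2 + 1)).symm
    · rw [if_neg hc]
      have h1 : inat + 1 - 1 = inat := by omega
      have := ih (inat + 1) (by omega)
      rw [h1] at this
      simpa using this

-- ===== VERDICT (by name: the statement is the Claim_ definition above) =====
theorem calcLocs_spec : Claim_equal_calcLocs := by
  intro numSteps numLines numCols currentLocs rocLocs _
  unfold Spec_calcLocs calcLocs_alt
  rw [calcLocs_eq_iterate]
  by_cases h : numSteps ≤ 0
  · have h0 : numSteps.toNat = 0 := by omega
    rw [h0]
    rfl
  · have hN : ((numSteps.toNat : Nat) : Int) = numSteps := by omega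
    have := loopB_eq_iterate numSteps numLines numCols rocLocs currentLocs numSteps.toNat hN
      numSteps.toNat 0 (by omega)
    simpa using this.symm
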